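-- pv_equiv track=rewrite | github.com/OJStuff/Get-DMR-IDs-LA | getdmridsla.py | removeConjugate
-- ===== SOURCE A (Python) =====
-- def removeConjugate(inputList: list) -> list:
--     """
--     Removes conjugates (x and -x pairs) in a list
--     Args:
--         inputList: List to process
--     Returns:
--         A list with conjugates (x and -x pairs) removed
--     """
--     negList: list = []
--     for nr in inputList:
--         if nr < 0:
--             negList.append(nr)
--     for nr in negList:
--         if (-nr) in inputList:
--             inputList.remove(nr)
--             inputList.remove(-nr)
--     return inputList
-- ===== SOURCE B (Python) =====
-- def removeConjugate(inputList: list) -> list: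
--     """
--     Removes conjugates (x and -x pairs) in a list, in one pass via counting.
--     (Same in-place result as the original: inputList is updated to the returned value.)
--     """
--     cnt = {}
--     for x in inputList:
--         cnt[x] = cnt.get(x, 0) + 1
--     drop = {}
--     for x in cnt:
--         if x != 0:
--             drop[x] = min(cnt[x], cnt.get(-x, 0))
--     out = []
--     for x in inputList:
--         if x != 0 and drop.get(x, 0) > 0:
--             drop[x] = drop[x] - 1
--         else:
--             out.append(x)
--     inputList[:] = out
--     return inputList
-- ===== Notes on version B (the rewrite author's own statement) =====
-- stated objective: faster
-- what changed: Replaced the quadratic remove-conjugates loop (repeated 'in' tests and list.remove scans driven by a list of negatives) with a single counting pass: build a count dict, compute min(count(x), count(-x)) drops per nonzero value, then filter the list once decrementing the drop counters.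
import Mathlib
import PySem

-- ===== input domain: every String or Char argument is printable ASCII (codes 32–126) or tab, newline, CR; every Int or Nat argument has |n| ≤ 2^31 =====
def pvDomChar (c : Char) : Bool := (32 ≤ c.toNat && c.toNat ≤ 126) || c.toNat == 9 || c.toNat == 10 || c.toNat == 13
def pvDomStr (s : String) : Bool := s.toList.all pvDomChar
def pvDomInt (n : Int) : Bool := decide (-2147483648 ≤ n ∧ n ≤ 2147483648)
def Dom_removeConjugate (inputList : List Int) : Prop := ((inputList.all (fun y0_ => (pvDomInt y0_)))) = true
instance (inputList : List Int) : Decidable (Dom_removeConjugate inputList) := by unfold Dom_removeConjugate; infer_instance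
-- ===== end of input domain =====

-- B replaces A's quadratic remove-conjugates loop with a single counting pass (objective: faster).
-- A mutates inputList in place and returns it; B performs the equivalent in-place update in Python.
-- The equivalence proved here is about the RETURN value.

-- ===== PORT A =====
def removeConjugate (inputList : List Int) : List Int :=
  let negList : List Int :=
    inputList.foldl (fun acc nr => if nr < 0 then acc ++ [nr] else acc) []
  negList.foldl (fun lst nr =>
    if (-nr) ∈ lst then
      match PySem.List.remove? lst nr with
      | none => lst        -- unreachable: nr is still present whenever the branch is taken, so A never raises
      | some l1 =>
        match PySem.List.remove? l1 (-nr) with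
        | none => l1       -- unreachable: -nr ∈ lst was just checked and -nr ≠ nr
        | some l2 => l2
    else lst) inputList

-- ===== PORT B =====
def removeConjugate_alt (inputList : List Int) : List Int :=
  let cnt : PySem.Dict Int Int :=
    inputList.foldl (fun d x => d.insert x (d.getD x 0 + 1)) PySem.Dict.empty
  let drop : PySem.Dict Int Int :=
    cnt.keys.foldl (fun d x =>
      if x ≠ 0 then d.insert x (min (cnt.getD x 0) (cnt.getD (-x) 0)) else d)
      PySem.Dict.empty     -- cnt[x] ported as getD: x is a key of cnt, so no KeyError
  let res :=
    inputList.foldl (fun (s : PySem.Dict Int Int × List Int) x =>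
      if x ≠ 0 ∧ 0 < s.1.getD x 0 then (s.1.insert x (s.1.getD x 0 - 1), s.2)
      else (s.1, s.2 ++ [x])) (drop, ([] : List Int))
  res.2

-- ===== PRECONDITION & SPEC =====
def Spec_removeConjugate (inputList : List Int) (out : List Int) : Prop := out = removeConjugate_alt inputList
instance (inputList : List Int) (out : List Int) : Decidable (Spec_removeConjugate inputList out) := by unfold Spec_removeConjugate; infer_instance

-- ===== CLAIM (what is proved, stated in full; the proofs are below) =====
def Claim_equal_removeConjugate : Prop := ∀ (inputList : List Int), Dom_removeConjugate inputList → Spec_removeConjugate inputList (removeConjugate inputList)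

-- ===== LEMMAS AND PROOFS =====

-- `dropG l f` keeps l except that, scanning left to right, a nonzero element x is dropped while its
-- budget f x is positive (decrementing it).  Both ports compute `dropG inputList (pvF inputList)`.
def dropG : List Int → (Int → Int) → List Int
  | [], _ => []
  | x :: xs, f =>
      if x ≠ 0 ∧ 0 < f x then dropG xs (fun y => if y = x then f y - 1 else f y)
      else x :: dropG xs f

lemma dropG_congr (l : List Int) (f f' : Int → Int)
    (h : ∀ x ∈ l, x ≠ 0 → f x = f' x) : dropG l f = dropG l f' := by
  induction l generalizing f f' with
  | nil => rfl
  | cons x xs ih =>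
    have hrest : ∀ y ∈ xs, y ≠ 0 → f y = f' y :=
      fun y hy => h y (List.mem_cons_of_mem _ hy)
    by_cases hx : x = 0
    · rw [dropG, dropG, if_neg (by simp [hx]), if_neg (by simp [hx])]
      exact congrArg (x :: ·) (ih f f' hrest)
    · have hfx : f x = f' x := h x List.mem_cons_self hx
      rw [dropG, dropG, hfx]
      by_cases hc : x ≠ 0 ∧ 0 < f' x
      · rw [if_pos hc, if_pos hc]
        exact ih _ _ (fun y hy hy0 => by
          by_cases hyx : y = x <;> simp [hyx, hfx, hrest y hy hy0])
      · rw [if_neg hc, if_neg hc]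
        exact congrArg (x :: ·) (ih f f' hrest)

lemma dropG_zero (l : List Int) (f : Int → Int) (h : ∀ x, f x ≤ 0) : dropG l f = l := by
  induction l with
  | nil => rfl
  | cons x xs ih =>
    rw [dropG, if_neg (by have := h x; omega), ih]

lemma dropG_count (l : List Int) (f : Int → Int) (y : Int) (hy : y ≠ 0)
    (hf : ∀ z, 0 ≤ f z) :
    ((dropG l f).count y : Int) = max ((l.count y : Int) - f y) 0 := by
  induction l generalizing f with
  | nil => have := hf y; simp [dropG]; omega
  | cons x xs ih =>
    by_cases hc : x ≠ 0 ∧ 0 < f x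
    · rw [dropG, if_pos hc]
      have hf' : ∀ z, 0 ≤ (fun z => if z = x then f z - 1 else f z) z := by
        intro z
        by_cases hz : z = x
        · simp only [hz]; have := hf x; omega
        · simp only [if_neg hz]; exact hf z
      have hih := ih _ hf'
      by_cases hyx : y = x
      · subst hyx
        simp only at hih
        simp only [List.count_cons_self]
        push_cast at hih ⊢; omega
      · simp only [if_neg hyx] at hih
        simp only [List.count_cons, beq_iff_eq, if_neg (fun h => hyx (Eq.symm h))]
        omega
    · rw [dropG, if_neg hc]
      have hih := ih f hf
      by_cases hyx : y = x
      · subst hyx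
        have hfy : f y ≤ 0 := by
          rcases not_and_or.mp hc with h1 | h1
          · exact absurd hy (by simpa using h1)
          · omega
        simp only [List.count_cons_self]
        push_cast at hih ⊢; omega
      · simp only [List.count_cons, beq_iff_eq, if_neg (fun h => hyx (Eq.symm h))]
        push_cast at hih ⊢; omega

lemma mem_dropG (l : List Int) (f : Int → Int) (y : Int) (hy : y ≠ 0)
    (hf : ∀ z, 0 ≤ f z) : y ∈ dropG l f ↔ f y < (l.count y : Int) := by
  rw [← List.count_pos_iff]
  have := dropG_count l f y hy hf
  omega

lemma erase_dropG (l : List Int) (f : Int → Int) (y : Int) (hy : y ≠ 0)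
    (hf : ∀ z, 0 ≤ f z) (hlt : f y < (l.count y : Int)) :
    (dropG l f).erase y = dropG l (fun z => if z = y then f z + 1 else f z) := by
  induction l generalizing f with
  | nil => simp at hlt; have := hf y; omega
  | cons x xs ih =>
    by_cases hc : x ≠ 0 ∧ 0 < f x
    · rw [dropG, if_pos hc]
      have hf₁ : ∀ z, 0 ≤ (fun z => if z = x then f z - 1 else f z) z := by
        intro z
        by_cases hz : z = x
        · simp only [hz]; have := hc.2; omega
        · simp only [if_neg hz]; exact hf z
      have hlt₁ : (fun z => if z = x then f z - 1 else f z) y < (xs.count y : Int) := by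
        by_cases hyx : y = x
        · subst hyx
          rw [List.count_cons_self] at hlt; push_cast at hlt; simp; omega
        · simp only [if_neg hyx]
          rw [List.count_cons, if_neg (by simpa using fun h => hyx (Eq.symm h))] at hlt
          simpa using hlt
      rw [ih _ hf₁ hlt₁, dropG]
      by_cases hxy : x = y
      · subst hxy
        rw [if_pos ⟨hc.1, by have := hc.2; simp; omega⟩]
        congr 1
        funext z
        by_cases hz : z = x <;> simp [hz]
      · rw [if_pos (by simpa [if_neg hxy] using hc)]
        congr 1
        funext z
        by_cases hz1 : z = x <;> by_cases hz2 : z = y <;>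
          simp [hz1, hz2, hxy] <;> simp_all
    · rw [dropG, if_neg hc]
      by_cases hxy : x = y
      · subst hxy
        rw [List.erase_cons_head, dropG,
            if_pos ⟨hy, by have := hf x; simp; omega⟩]
        congr 1
        funext z
        by_cases hz : z = x <;> simp [hz]
      · rw [List.erase_cons_tail (by simpa using hxy)]
        have hlt' : f y < (xs.count y : Int) := by
          rw [List.count_cons, if_neg (by simpa using hxy)] at hlt
          simpa using hlt
        rw [ih f hf hlt', dropG, if_neg (by simp only [if_neg hxy]; exact hc)]

def pvF (L : List Int) (y : Int) : Int := min (L.count y : Int) (L.count (-y) : Int)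

def pvFOf (L p : List Int) (y : Int) : Int :=
  if y < 0 then min (p.count y : Int) (L.count (-y) : Int)
  else if 0 < y then min (p.count (-y) : Int) (L.count y : Int)
  else 0

lemma pvFOf_nonneg (L p : List Int) : ∀ y, 0 ≤ pvFOf L p y := by
  intro y; unfold pvFOf; split_ifs <;> positivity

lemma pvFOf_nil (L : List Int) : pvFOf L [] = fun _ => 0 := by
  funext y; unfold pvFOf; split_ifs <;> simp

lemma count_append_singleton (p : List Int) (a z : Int) :
    ((p ++ [a]).count z : Int) = (p.count z : Int) + if z = a then 1 else 0 := by
  rw [List.count_append]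
  by_cases hz : z = a
  · simp [hz]
  · have hb : (a == z) = false := beq_eq_false_iff_ne.mpr (fun h => hz (Eq.symm h))
    simp [List.count_singleton, hb, hz]

lemma pvFOf_snoc (L p : List Int) (nr : Int) (hnr : nr < 0) (z : Int) :
    pvFOf L (p ++ [nr]) z =
      if (p.count nr : Int) < (L.count (-nr) : Int) ∧ (z = nr ∨ z = -nr)
      then pvFOf L p z + 1 else pvFOf L p z := by
  by_cases hz1 : z = nr
  · rw [hz1]
    unfold pvFOf
    rw [count_append_singleton p nr nr]
    split_ifs <;> omega
  · by_cases hz2 : z = -nr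
    · rw [hz2]
      unfold pvFOf
      rw [neg_neg, count_append_singleton p nr nr]
      split_ifs <;> omega
    · unfold pvFOf
      rw [count_append_singleton p nr z, count_append_singleton p nr (-z)]
      have hz2' : ¬ -z = nr := by omega
      split_ifs <;> omega

lemma stepA (L p : List Int) (nr : Int) (hnr : nr < 0)
    (hcnt : (p.count nr : Int) + 1 ≤ (L.count nr : Int)) :
    (if (-nr) ∈ dropG L (pvFOf L p) then
      match PySem.List.remove? (dropG L (pvFOf L p)) nr with
      | none => dropG L (pvFOf L p)
      | some l1 =>
        match PySem.List.remove? l1 (-nr) with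
        | none => l1
        | some l2 => l2
    else dropG L (pvFOf L p)) = dropG L (pvFOf L (p ++ [nr])) := by
  have hnr0 : nr ≠ 0 := by omega
  have hmnr0 : -nr ≠ 0 := by omega
  have hne : -nr ≠ nr := by omega
  set f := pvFOf L p with hfdef
  have hfnn := pvFOf_nonneg L p
  have hfnr : f nr = min (p.count nr : Int) (L.count (-nr) : Int) := by
    simp only [hfdef, pvFOf]
    rw [if_pos hnr]
  have hfmnr : f (-nr) = min (p.count nr : Int) (L.count (-nr) : Int) := by
    simp only [hfdef, pvFOf]
    rw [if_neg (by omega), if_pos (by omega)]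
    simp
  set pc := (p.count nr : Int) with hpc
  set cn := (L.count nr : Int) with hcn
  set cp := (L.count (-nr) : Int) with hcp
  by_cases hcond : pc < cp
  · have hmem : (-nr) ∈ dropG L f := by
      rw [mem_dropG L f (-nr) hmnr0 hfnn, hfmnr]; omega
    rw [if_pos hmem]
    have hmemnr : nr ∈ dropG L f := by
      rw [mem_dropG L f nr hnr0 hfnn, hfnr]; omega
    rw [PySem.List.remove?_eq_some_erase _ _ hmemnr]
    have hltnr : f nr < cn := by rw [hfnr]; omega
    rw [erase_dropG L f nr hnr0 hfnn hltnr]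
    set f₁ : Int → Int := fun z => if z = nr then f z + 1 else f z with hf₁def
    have hf₁nn : ∀ z, 0 ≤ f₁ z := by
      intro z
      by_cases hz : z = nr
      · simp only [hf₁def, hz, if_pos rfl]; have := hfnn nr; omega
      · simp only [hf₁def, if_neg hz]; exact hfnn z
    have hf₁mnr : f₁ (-nr) = f (-nr) := by simp only [hf₁def, if_neg hne]
    have hmem₁ : (-nr) ∈ dropG L f₁ := by
      rw [mem_dropG L f₁ (-nr) hmnr0 hf₁nn, hf₁mnr, hfmnr]; omega
    dsimp only
    rw [PySem.List.remove?_eq_some_erase _ _ hmem₁]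
    have hlt₁ : f₁ (-nr) < cp := by rw [hf₁mnr, hfmnr]; omega
    rw [erase_dropG L f₁ (-nr) hmnr0 hf₁nn hlt₁]
    dsimp only
    congr 1
    funext z
    rw [pvFOf_snoc L p nr hnr z, ← hfdef, ← hpc, ← hcp]
    by_cases hz1 : z = nr
    · rw [hz1, if_neg (fun h => hne (Eq.symm h))]
      have he : f₁ nr = f nr + 1 := by simp [hf₁def]
      rw [he, if_pos ⟨hcond, Or.inl rfl⟩]
    · by_cases hz2 : z = -nr
      · rw [hz2, if_pos rfl, hf₁mnr, if_pos ⟨hcond, Or.inr rfl⟩]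
      · rw [if_neg hz2]
        have he : f₁ z = f z := by simp [hf₁def, hz1]
        rw [he, if_neg (by tauto)]
  · have hmem : (-nr) ∉ dropG L f := by
      rw [mem_dropG L f (-nr) hmnr0 hfnn, hfmnr]; omega
    rw [if_neg hmem]
    congr 1
    funext z
    rw [pvFOf_snoc L p nr hnr z, ← hfdef, ← hpc, ← hcp, if_neg (by tauto)]

lemma loopA (L : List Int) (q p : List Int)
    (hpq : p ++ q = L.filter (fun x => decide (x < 0))) :
    q.foldl (fun lst nr =>
      if (-nr) ∈ lst then
        match PySem.List.remove? lst nr with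
        | none => lst
        | some l1 =>
          match PySem.List.remove? l1 (-nr) with
          | none => l1
          | some l2 => l2
      else lst) (dropG L (pvFOf L p)) = dropG L (pvFOf L (p ++ q)) := by
  induction q generalizing p with
  | nil => simp
  | cons nr q' ih =>
    have hmemq : nr ∈ L.filter (fun x => decide (x < 0)) := by
      rw [← hpq]; exact List.mem_append_right p List.mem_cons_self
    have hnr : nr < 0 := by simpa using (List.mem_filter.mp hmemq).2
    have hcnt : (p.count nr : Int) + 1 ≤ (L.count nr : Int) := by
      have h1 : (p ++ nr :: q').count nr = (L.filter (fun x => decide (x < 0))).count nr := by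
        rw [hpq]
      have h2 : (L.filter (fun x => decide (x < 0))).count nr ≤ L.count nr :=
        List.Sublist.count_le nr List.filter_sublist
      rw [List.count_append, List.count_cons_self] at h1
      omega
    rw [List.foldl_cons, stepA L p nr hnr hcnt,
        ih (p ++ [nr]) (by rw [← hpq]; simp)]
    simp

lemma a_eq_dropG (L : List Int) : removeConjugate L = dropG L (pvF L) := by
  unfold removeConjugate
  rw [PySem.List.foldl_append_ite_eq_filter, List.nil_append]
  have hmain := loopA L (L.filter (fun x => decide (x < 0))) [] (by simp)
  rw [List.nil_append] at hmain
  rw [pvFOf_nil L, dropG_zero L _ (fun _ => le_refl 0)] at hmain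
  rw [hmain]
  apply dropG_congr
  intro x hx hx0
  unfold pvFOf pvF
  by_cases hxn : x < 0
  · rw [if_pos hxn, List.count_filter (by simpa using hxn)]
  · rw [if_neg hxn, if_pos (by omega), List.count_filter (by simp; omega), min_comm]

lemma getD_foldl_insert_if (ks : List Int) (v : Int → Int) (d : PySem.Dict Int Int) (y : Int) :
    (ks.foldl (fun d x => if x ≠ 0 then d.insert x (v x) else d) d).getD y 0 =
      if y ∈ ks ∧ y ≠ 0 then v y else d.getD y 0 := by
  induction ks generalizing d with
  | nil => simp
  | cons k ks ih =>
    rw [List.foldl_cons]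
    by_cases hk : k = 0
    · rw [if_neg (by simp [hk] : ¬ k ≠ 0), ih d]
      by_cases hy : y ∈ ks ∧ y ≠ 0
      · rw [if_pos hy, if_pos ⟨List.mem_cons_of_mem _ hy.1, hy.2⟩]
      · rw [if_neg hy, if_neg (by
          rintro ⟨hmem, hy0⟩
          rcases List.mem_cons.mp hmem with h | h
          · exact hy0 (h.trans hk)
          · exact hy ⟨h, hy0⟩)]
    · rw [if_pos (by simpa using hk : k ≠ 0), ih (d.insert k (v k))]
      by_cases hy : y ∈ ks ∧ y ≠ 0
      · rw [if_pos hy, if_pos ⟨List.mem_cons_of_mem _ hy.1, hy.2⟩]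
      · rw [if_neg hy, PySem.Dict.getD_insert]
        by_cases hyk : y = k
        · rw [if_pos hyk, if_pos ⟨by simp [hyk], by rw [hyk]; simpa using hk⟩, hyk]
        · rw [if_neg hyk, if_neg (by
            rintro ⟨hmem, hy0⟩
            rcases List.mem_cons.mp hmem with h | h
            · exact hyk h
            · exact hy ⟨h, hy0⟩)]

lemma foldl_pass (l : List Int) (d : PySem.Dict Int Int) (out : List Int) :
    (l.foldl (fun (s : PySem.Dict Int Int × List Int) x =>
      if x ≠ 0 ∧ 0 < s.1.getD x 0 then (s.1.insert x (s.1.getD x 0 - 1), s.2)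
      else (s.1, s.2 ++ [x])) (d, out)).2
      = out ++ dropG l (fun y => d.getD y 0) := by
  induction l generalizing d out with
  | nil => simp [dropG]
  | cons x xs ih =>
    rw [List.foldl_cons, dropG]
    by_cases hc : x ≠ 0 ∧ 0 < d.getD x 0
    · rw [if_pos hc, if_pos hc, ih]
      congr 1
      apply dropG_congr
      intro z hz hz0
      rw [PySem.Dict.getD_insert]
      by_cases hzx : z = x
      · rw [if_pos hzx, if_pos hzx, hzx]
      · rw [if_neg hzx, if_neg hzx]
    · rw [if_neg hc, if_neg hc, ih, List.append_assoc, List.singleton_append]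

lemma b_eq_dropG (L : List Int) : removeConjugate_alt L = dropG L (pvF L) := by
  unfold removeConjugate_alt
  rw [PySem.Dict.foldl_insert_getD_add_one_eq_counter]
  rw [foldl_pass]
  rw [List.nil_append]
  apply dropG_congr
  intro x hx hx0
  rw [getD_foldl_insert_if, PySem.Dict.keys_counter]
  rw [if_pos ⟨(PySem.Set.mem_ofList L x).mpr hx, hx0⟩]
  rw [PySem.Dict.getD_counter, PySem.Dict.getD_counter]
  rfl


-- ===== VERDICT (by name: the statement is the Claim_ definition above) =====
theorem removeConjugate_spec : Claim_equal_removeConjugate := by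
  intro L _
  unfold Spec_removeConjugate
  rw [a_eq_dropG, b_eq_dropG]
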